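-- pv_equiv track=rewrite | github.com/pkr465/care | agents/context/header_context_builder.py | _match_braces
-- ===== SOURCE A (Python) =====
-- from typing import Any, Dict, List, Optional, Set, Tuple
--
-- def _match_braces(content: str, start: int) -> Tuple[Optional[str], int]:
--     """Find matching closing brace, returns (body_text, end_pos)."""
--     if start >= len(content) or content[start] != '{':
--         return None, start
--     depth = 0
--     i = start
--     while i < len(content):
--         ch = content[i]
--         if ch == '{':
--             depth += 1
--         elif ch == '}':
--             depth -= 1
--             if depth == 0:
--                 return content[start + 1:i], i + 1
--         elif ch == '"' or ch == "'":
--             # Skip string/char literals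
--             quote = ch
--             i += 1
--             while i < len(content) and content[i] != quote:
--                 if content[i] == '\\':
--                     i += 1
--                 i += 1
--         i += 1
--     return None, start
-- ===== SOURCE B (Python) =====
-- def _match_braces(content, start):
--     """Find matching closing brace, returns (body_text, end_pos).
--
--     Two staged passes: pass 1 masks out string/char literals (their characters,
--     including quotes and escapes, are blanked to ' '), pass 2 is a plain brace
--     counter over the masked characters."""
--     n = len(content)
--     if start >= n or content[start] != '{':
--         return None, start
--     # Pass 1: build the masked character list for content[start:].
--     masked = []
--     i = start
--     while i < n:
--         ch = content[i]
--         if ch == '"' or ch == "'":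
--             masked.append(' ')          # opening quote
--             i += 1
--             while i < n and content[i] != ch:
--                 masked.append(' ')
--                 if content[i] == '\\' and i + 1 < n:
--                     masked.append(' ')
--                     i += 1
--                 i += 1
--             if i < n:
--                 masked.append(' ')      # closing quote
--                 i += 1
--         else:
--             masked.append(ch)
--             i += 1
--     # Pass 2: count braces over the masked list.
--     depth = 0
--     for j, ch in enumerate(masked):
--         if ch == '{':
--             depth += 1
--         elif ch == '}':
--             depth -= 1
--             if depth == 0:
--                 return content[start + 1:start + j], start + j + 1
--     return None, start
-- ===== Notes on version B (the rewrite author's own statement) =====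
-- stated objective: alternative
-- what changed: B replaces A's single interleaved scan (brace counting with an inner string-literal skip loop) by two staged passes: pass 1 builds a masked character list with string/char literals blanked out, pass 2 is a plain flat brace counter over that list.
import Mathlib
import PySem

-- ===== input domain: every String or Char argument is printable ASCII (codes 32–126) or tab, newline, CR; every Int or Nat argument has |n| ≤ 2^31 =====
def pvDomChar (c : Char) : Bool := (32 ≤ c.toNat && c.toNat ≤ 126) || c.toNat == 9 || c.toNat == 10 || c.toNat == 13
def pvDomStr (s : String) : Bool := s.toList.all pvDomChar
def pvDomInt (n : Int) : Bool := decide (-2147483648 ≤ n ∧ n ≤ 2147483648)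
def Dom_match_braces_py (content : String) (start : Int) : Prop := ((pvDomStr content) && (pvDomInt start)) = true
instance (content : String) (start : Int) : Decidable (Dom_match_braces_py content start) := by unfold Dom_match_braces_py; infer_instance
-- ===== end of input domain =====

-- B replaces A's single interleaved scan (brace depth + inner string-skip loop) by two
-- staged passes: pass 1 masks string/char literals out of the characters, pass 2 is a
-- plain flat brace counter over the masked list.  Same values everywhere A returns.
-- Loops are fueled (fuel = characters left at entry); the index advances each step.

-- ===== PORT A =====
-- inner `while` of A: skip a string/char literal; returns the index of the closing quote
-- (or an index ≥ len).  The ' ' default of getD is never the value read for indices in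
-- range (-len ≤ i < len); out-of-range reads are guarded by `i < len`.
def aStrSkip (s : String) (quote : Char) : Nat → Int → Int
  | 0, i => i
  | fuel + 1, i =>
    if i < PySem.Str.len s then
      if (PySem.Str.pyGet? s i).getD ' ' = quote then i
      else if (PySem.Str.pyGet? s i).getD ' ' = '\\' then aStrSkip s quote fuel (i + 2)
      else aStrSkip s quote fuel (i + 1)
    else i

-- outer `while` of A
def aLoop (s : String) (start : Int) : Nat → Int → Int → Option String × Int
  | 0, _, _ => (none, start)
  | fuel + 1, i, depth =>
    if i < PySem.Str.len s then
      if (PySem.Str.pyGet? s i).getD ' ' = '{' then aLoop s start fuel (i + 1) (depth + 1)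
      else if (PySem.Str.pyGet? s i).getD ' ' = '}' then
        if depth - 1 = 0 then (some (PySem.Str.slice s (some (start + 1)) (some i)), i + 1)
        else aLoop s start fuel (i + 1) (depth - 1)
      else if (PySem.Str.pyGet? s i).getD ' ' = '"' ∨ (PySem.Str.pyGet? s i).getD ' ' = '\'' then
        aLoop s start fuel (aStrSkip s ((PySem.Str.pyGet? s i).getD ' ') fuel (i + 1) + 1) depth
      else aLoop s start fuel (i + 1) depth
    else (none, start)

def match_braces_py (content : String) (start : Int) : Option String × Int :=
  if start ≥ PySem.Str.len content then (none, start)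
  else match PySem.Str.pyGet? content start with
    | none => (none, start)  -- Python raises IndexError here (start < -len); excluded by Pre_
    | some c =>
      if c ≠ '{' then (none, start)
      else aLoop content start (PySem.Str.len content - start).toNat start 0

-- ===== PORT B =====
-- pass 1, inner `while` of Source B: mask the inside of a string literal; returns the masked
-- chunk (all ' ') and the resume index (the closing quote's index, or one ≥ len).
def bMaskStr (s : String) (q : Char) : Nat → Int → List Char × Int
  | 0, i => ([], i)
  | fuel + 1, i =>
    if i < PySem.Str.len s then
      if (PySem.Str.pyGet? s i).getD ' ' = q then ([], i)
      else if (PySem.Str.pyGet? s i).getD ' ' = '\\' ∧ i + 1 < PySem.Str.len s then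
        let r := bMaskStr s q fuel (i + 2)
        (' ' :: ' ' :: r.1, r.2)
      else
        let r := bMaskStr s q fuel (i + 1)
        (' ' :: r.1, r.2)
    else ([], i)

-- pass 1, outer `while` of Source B: the masked character list of content[i:]
def bMask (s : String) : Nat → Int → List Char
  | 0, _ => []
  | fuel + 1, i =>
    if i < PySem.Str.len s then
      if (PySem.Str.pyGet? s i).getD ' ' = '"' ∨ (PySem.Str.pyGet? s i).getD ' ' = '\'' then
        let r := bMaskStr s ((PySem.Str.pyGet? s i).getD ' ') fuel (i + 1)
        ' ' :: (r.1 ++ (if r.2 < PySem.Str.len s then ' ' :: bMask s fuel (r.2 + 1) else []))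
      else (PySem.Str.pyGet? s i).getD ' ' :: bMask s fuel (i + 1)
    else []

-- pass 2 of Source B: plain brace counter over the masked list (j = offset from start)
def bCount (s : String) (start : Int) : List Char → Int → Int → Option String × Int
  | [], _, _ => (none, start)
  | c :: rest, j, depth =>
    if c = '{' then bCount s start rest (j + 1) (depth + 1)
    else if c = '}' then
      if depth - 1 = 0 then
        (some (PySem.Str.slice s (some (start + 1)) (some (start + j))), start + j + 1)
      else bCount s start rest (j + 1) (depth - 1)
    else bCount s start rest (j + 1) depth

def match_braces_py_alt (content : String) (start : Int) : Option String × Int :=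
  if start ≥ PySem.Str.len content then (none, start)
  else match PySem.Str.pyGet? content start with
    | none => (none, start)  -- IndexError in Python B too; excluded by Pre_
    | some c =>
      if c ≠ '{' then (none, start)
      else bCount content start (bMask content (PySem.Str.len content - start).toNat start) 0 0

-- ===== PRECONDITION & SPEC =====
-- Pre_ excludes exactly start < -len(content): there content[start] in the initial guard
-- raises IndexError in A (and in B alike); everywhere else both return normally.
def Pre_match_braces_py (content : String) (start : Int) : Prop :=
  -(PySem.Str.len content) ≤ start
instance (content : String) (start : Int) : Decidable (Pre_match_braces_py content start) := by
  unfold Pre_match_braces_py; infer_instance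

def pvWitness_match_braces_py : String × Int := ("{\"a}\" }", 0)

def Spec_match_braces_py (content : String) (start : Int) (out : Option String × Int) : Prop :=
  out = match_braces_py_alt content start
instance (content : String) (start : Int) (out : Option String × Int) :
    Decidable (Spec_match_braces_py content start out) := by
  unfold Spec_match_braces_py; infer_instance

-- ===== CLAIM (what is proved, stated in full; the proofs are below) =====
def Claim_equal_match_braces_py : Prop := ∀ (content : String) (start : Int), Dom_match_braces_py content start → Pre_match_braces_py content start → Spec_match_braces_py content start (match_braces_py content start)

-- ===== LEMMAS AND PROOFS =====

theorem aStrSkip_end (s : String) (q : Char) :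
    ∀ (f : Nat) (i : Int), PySem.Str.len s ≤ i → aStrSkip s q f i = i
  | 0, _, _ => rfl
  | _ + 1, _, h => by rw [aStrSkip, if_neg (by omega)]

theorem aLoop_end (s : String) (start : Int) :
    ∀ (f : Nat) (i depth : Int), PySem.Str.len s ≤ i → aLoop s start f i depth = (none, start)
  | 0, _, _, _ => rfl
  | _ + 1, _, _, h => by rw [aLoop, if_neg (by omega)]

-- a run of spaces contributes nothing to the brace counter except advancing j
theorem bCount_spaces (s : String) (start : Int) :
    ∀ (m : List Char), (∀ c ∈ m, c = ' ') → ∀ (rest : List Char) (j depth : Int),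
      bCount s start (m ++ rest) j depth = bCount s start rest (j + m.length) depth
  | [], _, rest, j, depth => by simp
  | c :: m, h, rest, j, depth => by
    have hc : c = ' ' := h c (by simp)
    subst hc
    rw [List.cons_append, bCount, if_neg (by decide), if_neg (by decide),
        bCount_spaces s start m (fun c hc => h c (by simp [hc])) rest (j + 1) depth]
    congr 1
    simp only [List.length_cons]
    push_cast
    ring

-- pass-1 inner loop vs A's inner skipper: the chunk is all spaces, its length is the
-- distance travelled, and the resume index is exactly where aStrSkip stops (when a
-- closing quote exists) or both run past the end.
theorem bMaskStr_spec (s : String) (q : Char) :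
    ∀ (f : Nat) (i : Int), (PySem.Str.len s - i).toNat ≤ f →
      (∀ c ∈ (bMaskStr s q f i).1, c = ' ') ∧
      (bMaskStr s q f i).2 - i = (bMaskStr s q f i).1.length ∧
      (∀ g₂ : Nat, (PySem.Str.len s - i).toNat ≤ g₂ →
        ((bMaskStr s q f i).2 < PySem.Str.len s ∧ aStrSkip s q g₂ i = (bMaskStr s q f i).2)
        ∨ (PySem.Str.len s ≤ (bMaskStr s q f i).2 ∧ PySem.Str.len s ≤ aStrSkip s q g₂ i)) := by
  intro f
  induction f with
  | zero =>
    intro i hf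
    have hi : PySem.Str.len s ≤ i := by omega
    refine ⟨by simp [bMaskStr], by simp [bMaskStr], fun g₂ _ => Or.inr ⟨?_, ?_⟩⟩
    · exact hi
    · rw [aStrSkip_end s q g₂ i hi]; exact hi
  | succ f IH =>
    intro i hf
    by_cases hlt : i < PySem.Str.len s
    · by_cases h1 : (PySem.Str.pyGet? s i).getD ' ' = q
      · have e : bMaskStr s q (f + 1) i = ([], i) := by
          rw [bMaskStr, if_pos hlt, if_pos h1]
        refine ⟨by rw [e]; simp, by rw [e]; simp, fun g₂ hg₂ => ?_⟩
        obtain ⟨g₂', rfl⟩ : ∃ g', g₂ = g' + 1 := ⟨g₂ - 1, by omega⟩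
        rw [e]
        exact Or.inl ⟨hlt, by rw [aStrSkip, if_pos hlt, if_pos h1]⟩
      · by_cases h2 : (PySem.Str.pyGet? s i).getD ' ' = '\\' ∧ i + 1 < PySem.Str.len s
        · have e : bMaskStr s q (f + 1) i =
              (' ' :: ' ' :: (bMaskStr s q f (i + 2)).1, (bMaskStr s q f (i + 2)).2) := by
            rw [bMaskStr, if_pos hlt, if_neg h1, if_pos h2]
          obtain ⟨hsp, hlen, hskip⟩ := IH (i + 2) (by omega)
          refine ⟨?_, ?_, fun g₂ hg₂ => ?_⟩
          · rw [e]
            intro c hc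
            rcases List.mem_cons.mp hc with rfl | hc
            · rfl
            rcases List.mem_cons.mp hc with rfl | hc
            · rfl
            exact hsp c hc
          · rw [e]
            simp only [List.length_cons]
            push_cast
            omega
          · rw [e]
            obtain ⟨g₂', rfl⟩ : ∃ g', g₂ = g' + 1 := ⟨g₂ - 1, by omega⟩
            rw [aStrSkip, if_pos hlt, if_neg h1, if_pos h2.1]
            exact hskip g₂' (by omega)
        · have e : bMaskStr s q (f + 1) i =
              (' ' :: (bMaskStr s q f (i + 1)).1, (bMaskStr s q f (i + 1)).2) := by
            rw [bMaskStr, if_pos hlt, if_neg h1, if_neg h2]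
          obtain ⟨hsp, hlen, hskip⟩ := IH (i + 1) (by omega)
          refine ⟨?_, ?_, fun g₂ hg₂ => ?_⟩
          · rw [e]
            intro c hc
            rcases List.mem_cons.mp hc with rfl | hc
            · rfl
            exact hsp c hc
          · rw [e]
            simp only [List.length_cons]
            push_cast
            omega
          · rw [e]
            obtain ⟨g₂', rfl⟩ : ∃ g', g₂ = g' + 1 := ⟨g₂ - 1, by omega⟩
            by_cases h3 : (PySem.Str.pyGet? s i).getD ' ' = '\\'
            · -- backslash with no room: i + 1 ≥ len, both sides run past the end
              have hend : PySem.Str.len s ≤ i + 1 := by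
                by_contra hcon
                exact h2 ⟨h3, by omega⟩
              have e2 : (bMaskStr s q f (i + 1)).2 = i + 1 := by
                cases f with
                | zero => rfl
                | succ f' => rw [bMaskStr, if_neg (show ¬ (i + 1 < PySem.Str.len s) by omega)]
              rw [aStrSkip, if_pos hlt, if_neg h1, if_pos h3,
                  aStrSkip_end s q g₂' (i + 2) (by omega), e2]
              exact Or.inr ⟨by omega, by omega⟩
            · rw [aStrSkip, if_pos hlt, if_neg h1, if_neg h3]
              exact hskip g₂' (by omega)
    · have e : bMaskStr s q (f + 1) i = ([], i) := by rw [bMaskStr, if_neg hlt]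
      refine ⟨by rw [e]; simp, by rw [e]; simp, fun g₂ hg₂ => ?_⟩
      rw [e]
      exact Or.inr ⟨by omega, by rw [aStrSkip_end s q g₂ i (by omega)]; omega⟩

-- main invariant: counting braces over the masked list of content[i:] (at offset
-- i - start) is A's combined loop from i.
theorem mask_agree : ∀ (f : Nat) (s : String) (start i depth : Int) (g : Nat),
    (PySem.Str.len s - i).toNat ≤ f → (PySem.Str.len s - i).toNat ≤ g →
    bCount s start (bMask s f i) (i - start) depth = aLoop s start g i depth := by
  intro f
  induction f using Nat.strong_induction_on with
  | _ f IH =>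
    intro s start i depth g hf hg
    by_cases hlt : i < PySem.Str.len s
    · obtain ⟨f', rfl⟩ : ∃ f', f = f' + 1 := ⟨f - 1, by omega⟩
      obtain ⟨g', rfl⟩ : ∃ g', g = g' + 1 := ⟨g - 1, by omega⟩
      rw [aLoop, if_pos hlt, bMask, if_pos hlt]
      by_cases hq : (PySem.Str.pyGet? s i).getD ' ' = '"' ∨ (PySem.Str.pyGet? s i).getD ' ' = '\''
      · have h1 : ¬ (PySem.Str.pyGet? s i).getD ' ' = '{' := by
          rcases hq with h | h <;> simp only [h] <;> decide
        have h2 : ¬ (PySem.Str.pyGet? s i).getD ' ' = '}' := by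
          rcases hq with h | h <;> simp only [h] <;> decide
        rw [if_neg h1, if_neg h2, if_pos hq, if_pos hq]
        obtain ⟨hsp, hlen, hskip⟩ := bMaskStr_spec s ((PySem.Str.pyGet? s i).getD ' ') f' (i + 1) (by omega)
        rw [bCount, if_neg (by decide), if_neg (by decide),
            bCount_spaces s start _ hsp _ _ _]
        have hj : i - start + 1 +
              ((bMaskStr s ((PySem.Str.pyGet? s i).getD ' ') f' (i + 1)).1.length : Int)
            = (bMaskStr s ((PySem.Str.pyGet? s i).getD ' ') f' (i + 1)).2 - start := by omega
        rw [hj]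
        rcases hskip g' (by omega) with ⟨hi', hsk⟩ | ⟨hi', hsk⟩
        · rw [if_pos hi', hsk, bCount, if_neg (by decide), if_neg (by decide)]
          have hj2 : (bMaskStr s ((PySem.Str.pyGet? s i).getD ' ') f' (i + 1)).2 - start + 1
              = (bMaskStr s ((PySem.Str.pyGet? s i).getD ' ') f' (i + 1)).2 + 1 - start := by omega
          rw [hj2]
          exact IH f' (by omega) s start _ depth g' (by omega) (by omega)
        · rw [if_neg (by omega), bCount, aLoop_end s start g' _ depth (by omega)]
      · rw [if_neg hq, if_neg hq]
        by_cases hb : (PySem.Str.pyGet? s i).getD ' ' = '{'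
        · rw [bCount, if_pos hb, if_pos hb]
          have hj : i - start + 1 = i + 1 - start := by omega
          rw [hj]
          exact IH f' (by omega) s start (i + 1) (depth + 1) g' (by omega) (by omega)
        · rw [bCount, if_neg hb, if_neg hb]
          by_cases hc : (PySem.Str.pyGet? s i).getD ' ' = '}'
          · rw [if_pos hc, if_pos hc]
            by_cases hd : depth - 1 = 0
            · rw [if_pos hd, if_pos hd]
              have hi : start + (i - start) = i := by omega
              rw [hi]
            · rw [if_neg hd, if_neg hd]
              have hj : i - start + 1 = i + 1 - start := by omega
              rw [hj]
              exact IH f' (by omega) s start (i + 1) (depth - 1) g' (by omega) (by omega)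
          · rw [if_neg hc, if_neg hc]
            have hj : i - start + 1 = i + 1 - start := by omega
            rw [hj]
            exact IH f' (by omega) s start (i + 1) depth g' (by omega) (by omega)
    · have e : bMask s f i = [] := by
        cases f with
        | zero => rfl
        | succ f' => rw [bMask, if_neg hlt]
      rw [e, bCount, aLoop_end s start g i depth (by omega)]

-- ===== VERDICT (by name: the statement is the Claim_ definition above) =====
theorem match_braces_py_spec : Claim_equal_match_braces_py := by
  intro content start _ _
  unfold Spec_match_braces_py match_braces_py match_braces_py_alt
  by_cases h : start ≥ PySem.Str.len content
  · rw [if_pos h, if_pos h]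
  · rw [if_neg h, if_neg h]
    cases hg : PySem.Str.pyGet? content start with
    | none => rfl
    | some c =>
      by_cases hc : c ≠ '{'
      · simp only [if_pos hc]
      · simp only [if_neg hc]
        have := mask_agree (PySem.Str.len content - start).toNat content start start 0
          (PySem.Str.len content - start).toNat (le_refl _) (le_refl _)
        simpa using this.symm
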